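-- pv_equiv track=rewrite | github.com/czueon/caldera-attack-automation | scripts/get_operation_report.py | _extract_agents
-- ===== SOURCE A (Python) =====
-- from typing import Dict, List, Optional
--
-- def _extract_agents(operation: Dict) -> List[Dict]:
--     """Agent 정보 추출"""
--     agents = []
--     agent_set = set()
--
--     for link in operation.get('chain', []):
--         paw = link.get('paw')
--         if paw and paw not in agent_set:
--             agent_set.add(paw)
--             agents.append({
--                 'paw': paw,
--                 'platform': link.get('executor', 'unknown'),
--             })
--
--     return agents
-- ===== SOURCE B (Python) =====
-- from typing import Dict, List, Optional
--
-- def _extract_agents(operation: Dict) -> List[Dict]: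
--     """Agent 정보 추출"""
--     # Backward overwrite pass: after it, each truthy paw is mapped to the
--     # executor of its FIRST link (later writes in reversed order are earlier
--     # links).  Forward emit-and-pop pass: each paw is emitted exactly once, at
--     # its first occurrence, and popped so later occurrences find nothing.
--     chain = operation.get('chain', [])
--     platform = {}
--     for link in reversed(chain):
--         paw = link.get('paw')
--         if paw:
--             platform[paw] = link.get('executor', 'unknown')
--     agents = []
--     for link in chain:
--         paw = link.get('paw')
--         if paw in platform:
--             agents.append({'paw': paw, 'platform': platform.pop(paw)})
--     return agents
-- ===== Notes on version B (the rewrite author's own statement) =====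
-- stated objective: alternative
-- what changed: Replaces the seen-set dedupe loop by a backward unconditional-overwrite pass (last write in reversed order = first-seen executor) followed by a forward emit-and-pop pass; no membership guard is needed while building, and dedup happens by popping.
import Mathlib
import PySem

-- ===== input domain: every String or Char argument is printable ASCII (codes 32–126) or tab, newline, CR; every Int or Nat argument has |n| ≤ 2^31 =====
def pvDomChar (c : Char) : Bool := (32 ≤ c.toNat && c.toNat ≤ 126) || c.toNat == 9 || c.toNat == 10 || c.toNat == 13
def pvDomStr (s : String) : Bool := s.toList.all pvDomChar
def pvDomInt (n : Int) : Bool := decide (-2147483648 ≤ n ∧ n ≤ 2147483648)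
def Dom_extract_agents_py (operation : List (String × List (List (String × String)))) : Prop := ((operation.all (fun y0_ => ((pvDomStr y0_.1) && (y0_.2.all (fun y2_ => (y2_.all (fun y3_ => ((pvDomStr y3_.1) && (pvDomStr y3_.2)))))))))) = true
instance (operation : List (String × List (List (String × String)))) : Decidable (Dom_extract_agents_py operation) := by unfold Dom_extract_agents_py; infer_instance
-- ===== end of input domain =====

-- B replaces A's seen-set dedupe with a backward overwrite pass (first-seen executor
-- survives) plus a forward emit-and-pop pass; objective: alternative (same cost).


-- ===== PORT A =====
-- 'paw' is link.get('paw') collapsed to "" when the key is missing: Python's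
-- truthiness test treats None and "" alike, and paw is only used when truthy.
def extract_agents_py (operation : List (String × List (List (String × String)))) : List (List (String × String)) :=
  let chain := (PySem.Dict.mk operation).getD "chain" []
  (chain.foldl
    (fun (st : List (List (String × String)) × PySem.Set String) link =>
      let paw := ((PySem.Dict.mk link).get? "paw").getD ""
      if paw ≠ "" ∧ ¬ (PySem.Set.contains st.2 paw = true) then
        (st.1 ++ [[("paw", paw), ("platform", (PySem.Dict.mk link).getD "executor" "unknown")]],
         PySem.Set.add st.2 paw)
      else st)
    ([], PySem.Set.empty)).1

-- ===== PORT B =====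
-- Same "" collapse of a missing/None paw as in port A; 'paw in platform' needs no
-- separate truthiness test because only truthy paws were ever inserted, and
-- 'platform.pop(paw)' inside the guarded branch is get? (some v) followed by erase.
def extract_agents_py_alt (operation : List (String × List (List (String × String)))) : List (List (String × String)) :=
  let chain := (PySem.Dict.mk operation).getD "chain" []
  let platform : PySem.Dict String String := chain.reverse.foldl
    (fun d link =>
      let paw := ((PySem.Dict.mk link).get? "paw").getD ""
      if paw ≠ "" then d.insert paw ((PySem.Dict.mk link).getD "executor" "unknown")
      else d)
    PySem.Dict.empty
  (chain.foldl
    (fun (st : List (List (String × String)) × PySem.Dict String String) link =>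
      let paw := ((PySem.Dict.mk link).get? "paw").getD ""
      match st.2.get? paw with
      | some pl => (st.1 ++ [[("paw", paw), ("platform", pl)]], st.2.erase paw)
      | none => st)
    ([], platform)).1

-- ===== PRECONDITION & SPEC =====
def Spec_extract_agents_py (operation : List (String × List (List (String × String)))) (out : List (List (String × String))) : Prop := out = extract_agents_py_alt operation
instance (operation : List (String × List (List (String × String)))) (out : List (List (String × String))) : Decidable (Spec_extract_agents_py operation out) := by unfold Spec_extract_agents_py; infer_instance

-- ===== CLAIM (what is proved, stated in full; the proofs are below) =====
def Claim_equal_extract_agents_py : Prop := ∀ (operation : List (String × List (List (String × String)))), Dom_extract_agents_py operation → Spec_extract_agents_py operation (extract_agents_py operation)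

-- ===== LEMMAS AND PROOFS =====

-- Executor of the first link of `chain` whose (""-collapsed) paw is the truthy `q`.
def firstExec? : List (List (String × String)) → String → Option String
  | [], _ => none
  | l :: rest, q =>
      let paw := ((PySem.Dict.mk l).get? "paw").getD ""
      if paw ≠ "" ∧ paw = q then some ((PySem.Dict.mk l).getD "executor" "unknown")
      else firstExec? rest q

theorem firstExec?_empty (chain : List (List (String × String))) : firstExec? chain "" = none := by
  induction chain with
  | nil => rfl
  | cons l rest ih => simp [firstExec?, ih]

-- PySem has no Dict.erase lookup lemma, so this one is ours.
theorem get?_erase {ν : Type} (d : PySem.Dict String ν) (k k' : String) :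
    (d.erase k).get? k' = if k' = k then none else d.get? k' := by
  obtain ⟨l⟩ := d
  simp only [PySem.Dict.erase, PySem.Dict.get?]
  induction l with
  | nil => simp
  | cons p rest ih =>
    simp only [List.filter_cons]
    by_cases h : p.1 = k
    · rw [if_neg (by simp [h]), ih]
      by_cases h2 : k' = k
      · simp [h2]
      · rw [if_neg h2, if_neg h2, List.find?_cons_of_neg (h := by simp [h]; exact fun e => h2 e.symm)]
    · rw [if_pos (by simp [h])]
      by_cases hk' : p.1 = k'
      · rw [List.find?_cons_of_pos (h := by simp [hk']), if_neg (by intro e; exact h (e ▸ hk')),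
          List.find?_cons_of_pos (h := by simp [hk'])]
      · rw [List.find?_cons_of_neg (h := by simp [hk']), ih]
        by_cases h2 : k' = k
        · simp [h2]
        · rw [if_neg h2, if_neg h2, List.find?_cons_of_neg (h := by simp [hk'])]

-- B's backward overwrite pass computes the first-occurrence executor of every paw.
theorem buildRev_get? (chain : List (List (String × String))) (q : String) :
    (chain.reverse.foldl
      (fun d link =>
        let paw := ((PySem.Dict.mk link).get? "paw").getD ""
        if paw ≠ "" then d.insert paw ((PySem.Dict.mk link).getD "executor" "unknown")
        else d)
      PySem.Dict.empty).get? q = firstExec? chain q := by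
  induction chain with
  | nil => simp [firstExec?, PySem.Dict.get?_empty]
  | cons l rest ih =>
    rw [List.reverse_cons, List.foldl_append]
    simp only [List.foldl_cons, List.foldl_nil]
    by_cases hp : ((PySem.Dict.mk l).get? "paw").getD "" = ""
    · rw [if_neg (by simp [hp]), ih]
      simp [firstExec?, hp]
    · rw [if_pos hp]
      by_cases hq : q = ((PySem.Dict.mk l).get? "paw").getD ""
      · rw [hq, PySem.Dict.get?_insert_self]
        simp [firstExec?, hp]
      · rw [PySem.Dict.get?_insert_of_ne _ _ hq, ih]
        have hq' : ¬ (((PySem.Dict.mk l).get? "paw").getD "" = q) := fun e => hq e.symm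
        simp [firstExec?, hq']

-- Loop invariant: if B's remaining dict answers exactly "first executor in the
-- remaining chain, unless already emitted (in A's set)", the two folds agree.
theorem emit_loop_inv (rest : List (List (String × String)))
    (acc : List (List (String × String))) (s : PySem.Set String)
    (d : PySem.Dict String String)
    (H : ∀ q, d.get? q = if PySem.Set.contains s q then none else firstExec? rest q) :
    (rest.foldl
      (fun (st : List (List (String × String)) × PySem.Set String) link =>
        let paw := ((PySem.Dict.mk link).get? "paw").getD ""
        if paw ≠ "" ∧ ¬ (PySem.Set.contains st.2 paw = true) then
          (st.1 ++ [[("paw", paw), ("platform", (PySem.Dict.mk link).getD "executor" "unknown")]],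
           PySem.Set.add st.2 paw)
        else st)
      (acc, s)).1
    = (rest.foldl
        (fun (st : List (List (String × String)) × PySem.Dict String String) link =>
          let paw := ((PySem.Dict.mk link).get? "paw").getD ""
          match st.2.get? paw with
          | some pl => (st.1 ++ [[("paw", paw), ("platform", pl)]], st.2.erase paw)
          | none => st)
        (acc, d)).1 := by
  induction rest generalizing acc s d with
  | nil => rfl
  | cons l r ih =>
    simp only [List.foldl_cons]
    by_cases hp : ((PySem.Dict.mk l).get? "paw").getD "" = ""
    · have hB : d.get? (((PySem.Dict.mk l).get? "paw").getD "") = none := by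
        rw [hp, H ""]; split <;> simp [firstExec?_empty]
      rw [if_neg (fun h => h.1 hp)]
      simp only [hB]
      refine ih acc s d (fun q => ?_)
      rw [H q]
      by_cases hc : PySem.Set.contains s q = true
      · rw [if_pos hc, if_pos hc]
      · rw [if_neg hc, if_neg hc]
        simp [firstExec?, hp]
    · by_cases hs : PySem.Set.contains s (((PySem.Dict.mk l).get? "paw").getD "") = true
      · have hB : d.get? (((PySem.Dict.mk l).get? "paw").getD "") = none := by
          rw [H, if_pos hs]
        rw [if_neg (fun h => h.2 hs)]
        simp only [hB]
        refine ih acc s d (fun q => ?_)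
        rw [H q]
        by_cases hc : PySem.Set.contains s q = true
        · rw [if_pos hc, if_pos hc]
        · rw [if_neg hc, if_neg hc]
          have hq : ¬ (((PySem.Dict.mk l).get? "paw").getD "" = q) := fun e => hc (e ▸ hs)
          simp [firstExec?, hq]
      · have hB : d.get? (((PySem.Dict.mk l).get? "paw").getD "")
            = some ((PySem.Dict.mk l).getD "executor" "unknown") := by
          rw [H, if_neg hs]
          simp [firstExec?, hp]
        rw [if_pos ⟨hp, hs⟩]
        simp only [hB]
        refine ih _ _ _ (fun q => ?_)
        rw [get?_erase]
        by_cases hq : q = ((PySem.Dict.mk l).get? "paw").getD ""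
        · rw [if_pos hq, hq]
          have hmem : PySem.Set.contains (PySem.Set.add s (((PySem.Dict.mk l).get? "paw").getD ""))
              (((PySem.Dict.mk l).get? "paw").getD "") = true := by
            simp only [PySem.Set.contains, List.contains_iff_mem]
            exact (PySem.Set.mem_add s _ _).mpr (Or.inr rfl)
          rw [if_pos hmem]
        · rw [if_neg hq, H q]
          have hcs : PySem.Set.contains (PySem.Set.add s (((PySem.Dict.mk l).get? "paw").getD "")) q
              = PySem.Set.contains s q := by
            simp only [PySem.Set.contains, PySem.Set.add]
            split
            · rfl
            · simp [hq]
          rw [hcs]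
          by_cases hc : PySem.Set.contains s q = true
          · rw [if_pos hc, if_pos hc]
          · rw [if_neg hc, if_neg hc]
            have hq' : ¬ (((PySem.Dict.mk l).get? "paw").getD "" = q) := fun e => hq e.symm
            simp [firstExec?, hq']

-- ===== VERDICT (by name: the statement is the Claim_ definition above) =====
theorem extract_agents_py_spec : Claim_equal_extract_agents_py := by
  intro operation _
  unfold Spec_extract_agents_py extract_agents_py extract_agents_py_alt
  exact emit_loop_inv _ [] PySem.Set.empty _
    (fun q => by rw [buildRev_get?]; simp [PySem.Set.empty, PySem.Set.contains])
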